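-- pv_equiv track=rewrite | github.com/MarawanEmara/ICNAP-Hackathon-Crypton | map_creation.py | get_min_x_y
-- ===== SOURCE A (Python) =====
-- def get_min_x_y(list):
--     min_x = list[0][0]
--     min_y = list[0][1]
--     for machine in list:
--         if(machine[0] < min_x):
--             min_x = machine[0]
--         if(machine[1] < min_y):
--             min_y = machine[1]
--     return min_x, min_y
-- ===== SOURCE B (Python) =====
-- def get_min_x_y(list):
--     by_x = sorted(list, key=lambda m: m[0])
--     by_y = sorted(list, key=lambda m: m[1])
--     return by_x[0][0], by_y[0][1]
-- ===== Notes on version B (the rewrite author's own statement) =====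
-- stated objective: alternative
-- what changed: Replaces A's single running-minimum scan by a sort-based method: sort the pairs by each coordinate and read the minimum off the head of each sorted list.
import Mathlib
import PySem

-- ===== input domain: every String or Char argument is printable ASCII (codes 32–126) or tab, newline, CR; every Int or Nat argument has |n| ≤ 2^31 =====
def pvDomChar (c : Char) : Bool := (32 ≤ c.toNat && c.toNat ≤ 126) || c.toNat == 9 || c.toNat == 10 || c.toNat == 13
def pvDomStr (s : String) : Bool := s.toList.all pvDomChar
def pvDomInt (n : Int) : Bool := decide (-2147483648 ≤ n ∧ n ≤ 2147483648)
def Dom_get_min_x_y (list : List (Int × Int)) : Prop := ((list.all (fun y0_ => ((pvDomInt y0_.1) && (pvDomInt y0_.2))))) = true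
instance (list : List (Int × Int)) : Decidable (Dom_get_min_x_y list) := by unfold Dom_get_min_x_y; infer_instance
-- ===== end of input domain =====

-- B replaces A's single running-minimum scan by a sort-based method (sort by each
-- coordinate, read the head); an alternative algorithm, not faster.

-- ===== PORT A =====
-- A: seed both minimums from list[0], then one pass updating each on strict decrease.
def get_min_x_y (list : List (Int × Int)) : Int × Int :=
  let first := (PySem.List.pyGet? list 0).getD (0, 0)   -- list[0]; none (IndexError) excluded by Pre_
  list.foldl
    (fun s machine =>
      (if machine.1 < s.1 then machine.1 else s.1,
       if machine.2 < s.2 then machine.2 else s.2))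
    (first.1, first.2)

-- ===== PORT B =====
-- B: sort by each coordinate, minimum = head of sorted list (by_x[0] / by_y[0]).
def get_min_x_y_alt (list : List (Int × Int)) : Int × Int :=
  let by_x := PySem.List.sorted list (fun m => m.1) false
  let by_y := PySem.List.sorted list (fun m => m.2) false
  (((PySem.List.pyGet? by_x 0).getD (0, 0)).1,
   ((PySem.List.pyGet? by_y 0).getD (0, 0)).2)

-- ===== PRECONDITION & SPEC =====
-- A raises IndexError on the empty list (list[0]); Pre_ excludes exactly that input.
def Pre_get_min_x_y (list : List (Int × Int)) : Prop := list ≠ []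
instance (list : List (Int × Int)) : Decidable (Pre_get_min_x_y list) := by unfold Pre_get_min_x_y; infer_instance
def pvWitness_get_min_x_y : (List (Int × Int)) := [(3, -1), (2, 5)]

def Spec_get_min_x_y (list : List (Int × Int)) (out : Int × Int) : Prop := out = get_min_x_y_alt list
instance (list : List (Int × Int)) (out : Int × Int) : Decidable (Spec_get_min_x_y list out) := by unfold Spec_get_min_x_y; infer_instance

-- ===== CLAIM (what is proved, stated in full; the proofs are below) =====
def Claim_equal_get_min_x_y : Prop := ∀ (list : List (Int × Int)), Dom_get_min_x_y list → Pre_get_min_x_y list → Spec_get_min_x_y list (get_min_x_y list)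

-- ===== LEMMAS AND PROOFS =====

theorem pyGet_zero (hd : Int × Int) (t : List (Int × Int)) :
    PySem.List.pyGet? (hd :: t) 0 = some hd := by
  simp [PySem.List.pyGet?, PySem.List.pyIdx?]

-- A's interleaved fold computes the two column-wise min folds.
theorem pair_fold (t : List (Int × Int)) : ∀ (a b : Int),
    t.foldl
      (fun s machine =>
        (if machine.1 < s.1 then machine.1 else s.1,
         if machine.2 < s.2 then machine.2 else s.2))
      (a, b)
    = ((t.map (fun m => m.1)).foldl min a, (t.map (fun m => m.2)).foldl min b) := by
  induction t with
  | nil => intro a b; simp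
  | cons m t ih =>
      intro a b
      simp only [List.foldl_cons, List.map_cons]
      rw [show (if m.1 < a then m.1 else a) = min a m.1 by omega,
          show (if m.2 < b then m.2 else b) = min b m.2 by omega]
      exact ih (min a m.1) (min b m.2)

-- foldl min: lower bound and membership.
theorem foldl_min_spec (xs : List Int) : ∀ (a : Int),
    (xs.foldl min a = a ∨ xs.foldl min a ∈ xs) ∧
    xs.foldl min a ≤ a ∧ (∀ y ∈ xs, xs.foldl min a ≤ y) := by
  induction xs with
  | nil => intro a; simp
  | cons x xs ih =>
      intro a
      simp only [List.foldl_cons]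
      obtain ⟨hmem, hle, hall⟩ := ih (min a x)
      refine ⟨?_, le_trans hle (min_le_left _ _), ?_⟩
      · rcases hmem with h | h
        · rcases min_choice a x with hc | hc <;> rw [h, hc]
          · exact Or.inl rfl
          · exact Or.inr (List.mem_cons_self)
        · exact Or.inr (List.mem_cons_of_mem _ h)
      · intro y hy
        rcases List.mem_cons.mp hy with rfl | hy
        · exact le_trans hle (min_le_right _ _)
        · exact hall y hy

-- head of sorted (by a coordinate) = the foldl-min of that coordinate over hd :: t.
theorem head_sorted_eq_min (hd : Int × Int) (t : List (Int × Int)) (key : Int × Int → Int) :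
    key (((PySem.List.pyGet? (PySem.List.sorted (hd :: t) key false) 0).getD (0, 0)))
      = (t.map key).foldl min (key hd) := by
  rcases hs : PySem.List.sorted (hd :: t) key false with _ | ⟨m, t'⟩
  · exact absurd ((PySem.List.sorted_eq_nil_iff _ _ _).mp hs) (by simp)
  · rw [pyGet_zero, Option.getD_some]
    obtain ⟨hmem, hle, hall⟩ := foldl_min_spec (t.map key) (key hd)
    have hmL : m ∈ hd :: t := by
      have := PySem.List.mem_sorted (hd :: t) key false m
      rw [hs] at this; exact this.mp List.mem_cons_self
    have h1 : (t.map key).foldl min (key hd) ≤ key m := by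
      rcases List.mem_cons.mp hmL with rfl | hm
      · exact hle
      · exact hall _ (List.mem_map_of_mem hm)
    have h2 : key m ≤ (t.map key).foldl min (key hd) := by
      have hhead := PySem.List.key_head_sorted_le (hd :: t) key hs
      rcases hmem with h | h
      · rw [h]; exact hhead hd List.mem_cons_self
      · obtain ⟨y, hy, hyk⟩ := List.mem_map.mp h
        rw [← hyk]; exact hhead y (List.mem_cons_of_mem _ hy)
    omega

-- ===== VERDICT (by name: the statement is the Claim_ definition above) =====
theorem get_min_x_y_spec : Claim_equal_get_min_x_y := by
  intro list _ hpre
  cases list with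
  | nil => exact absurd rfl hpre
  | cons hd t =>
      show _ = _
      simp only [get_min_x_y, get_min_x_y_alt, pyGet_zero, Option.getD_some]
      rw [head_sorted_eq_min hd t (fun m => m.1), head_sorted_eq_min hd t (fun m => m.2)]
      simp only [List.foldl_cons]
      rw [show (if hd.1 < hd.1 then hd.1 else hd.1) = hd.1 by omega,
          show (if hd.2 < hd.2 then hd.2 else hd.2) = hd.2 by omega]
      exact pair_fold t hd.1 hd.2
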